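-- pv_equiv track=rewrite | github.com/alexandraback/datacollection | solutions_2692487_1/Python/vojnovski/main.py | presmetaj
-- ===== SOURCE A (Python) =====
-- def presmetaj(start, motes, dolz):
--     # if starting mote is 1 there is no way to finish apart from deleting all
--     if start < 2:
--         return dolz
--     motes.sort()
--     summa = start
--     operations = 0
--     i = 0
--     while i < len(motes):
--         if summa > max(motes[i:]):
--             return  min(dolz,operations)
--         if summa > motes[i]:
--             summa = summa + motes[i]
--         else:
--             tempop = 0
--             while summa <= motes[i]:
--                 summa = summa + summa -1
--                 tempop = tempop + 1
--             if tempop >= len(motes[i:]):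
--                 return min(dolz, operations +len(motes[i:]) )
--             else:
--                 operations = operations + tempop
--                 i = i -1
--         i = i + 1
--     return min(dolz,operations)
-- ===== SOURCE B (Python) =====
-- def presmetaj(start, motes, dolz):
--     # Same greedy, but a single scan (the largest mote is read once from the
--     # sorted list instead of a max over the remaining slice at every step) and
--     # the growth count computed in closed form instead of a doubling loop.
--     # Like A, sorts the motes list in place.
--     if start < 2:
--         return dolz
--     motes.sort()
--     if not motes:
--         return min(dolz, 0)
--     last = motes[-1]
--     n = len(motes)
--     summa = start
--     operations = 0
--     for i in range(n):
--         if summa > last: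
--             break
--         m = motes[i]
--         if summa <= m:
--             g = summa - 1
--             q = (m + g - 1) // g
--             t = (q - 1).bit_length()
--             if t >= n - i:
--                 return min(dolz, operations + (n - i))
--             operations += t
--             summa = g * (1 << t) + 1
--         summa += m
--     return min(dolz, operations)
-- ===== Notes on version B (the rewrite author's own statement) =====
-- stated objective: alternative
-- what changed: B reads the sorted list's largest mote once instead of A's max(motes[i:]) slice-scan on every iteration, and replaces A's iterative doubling loop plus i-=1 backtrack by a closed-form growth count via ceiling division and bit_length, eating the mote in the same pass.
-- outside the precondition, e.g. on presmetaj(3, [-1, 5], 9): A returns 1, B returns 1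
import Mathlib
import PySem

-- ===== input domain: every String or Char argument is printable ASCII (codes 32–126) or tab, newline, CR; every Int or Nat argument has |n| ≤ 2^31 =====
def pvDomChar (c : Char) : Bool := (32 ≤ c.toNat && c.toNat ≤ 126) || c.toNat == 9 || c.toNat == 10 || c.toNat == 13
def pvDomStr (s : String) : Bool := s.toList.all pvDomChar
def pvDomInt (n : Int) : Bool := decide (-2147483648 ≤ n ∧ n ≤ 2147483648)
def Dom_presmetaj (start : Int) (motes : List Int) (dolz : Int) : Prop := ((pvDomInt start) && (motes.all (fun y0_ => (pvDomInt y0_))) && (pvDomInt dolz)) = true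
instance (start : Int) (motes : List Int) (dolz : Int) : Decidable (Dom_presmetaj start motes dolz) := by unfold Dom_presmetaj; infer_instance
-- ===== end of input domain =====

-- B reads the largest mote once from the sorted list instead of A's per-step max over the
-- remaining slice, and computes the growth count in closed form instead of A's doubling loop;
-- same return value (like A, the Python B sorts `motes` in place — the equivalence proved
-- here is about the return value only).

-- ===== PORT A =====
-- inner `while summa <= motes[i]` doubling loop; fuel is only a totality guard
-- (sufficient whenever 2 ≤ summa, which Pre_ guarantees)
def presmetajGrow (fuel : Nat) (summa m : Int) : Int × Int :=
  match fuel with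
  | 0 => (summa, 0)
  | f + 1 =>
    if summa ≤ m then
      let r := presmetajGrow f (summa + summa - 1) m
      (r.1, r.2 + 1)
    else (summa, 0)

-- the outer `while i < len(motes)` loop; the suffix motes[i:] is the list `rest`
-- (A's `i = i - 1; i = i + 1` backtrack keeps `rest` unchanged); fuel is a totality guard
def presmetajLoop (fuel : Nat) (summa operations : Int) (rest : List Int) (dolz : Int) : Int :=
  match fuel, rest with
  | 0, _ => min dolz operations
  | _ + 1, [] => min dolz operations
  | f + 1, m :: rs =>
    if summa > (PySem.List.max? (m :: rs) (fun y => y)).getD 0 then min dolz operations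
    else if summa > m then presmetajLoop f (summa + m) operations rs dolz
    else
      let g := presmetajGrow ((m - summa).toNat + 1) summa m
      if g.2 ≥ ((m :: rs).length : Int) then min dolz (operations + ((m :: rs).length : Int))
      else presmetajLoop f g.1 (operations + g.2) (m :: rs) dolz

def presmetaj (start : Int) (motes : List Int) (dolz : Int) : Int :=
  if start < 2 then dolz
  else
    let ms := PySem.List.sorted motes (fun y => y) false
    presmetajLoop (2 * ms.length + 1) start 0 ms dolz

-- ===== PORT B =====
def presmetajAltLoop (rest : List Int) (summa operations last dolz : Int) : Int :=
  match rest with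
  | [] => min dolz operations
  | m :: rs =>
    if summa > last then min dolz operations
    else
      if summa ≤ m then
        let g := summa - 1
        let q := PySem.Int.floordiv (m + g - 1) g
        let t := PySem.Int.bitLength (q - 1)
        if (t : Int) ≥ (rs.length : Int) + 1 then min dolz (operations + ((rs.length : Int) + 1))
        else presmetajAltLoop rs (g * 2 ^ t + 1 + m) (operations + (t : Int)) last dolz
      else presmetajAltLoop rs (summa + m) operations last dolz

def presmetaj_alt (start : Int) (motes : List Int) (dolz : Int) : Int :=
  if start < 2 then dolz
  else
    let ms := PySem.List.sorted motes (fun y => y) false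
    match ms with
    | [] => min dolz 0
    | m :: rs =>
      presmetajAltLoop (m :: rs) start 0 ((PySem.List.pyGet? (m :: rs) (-1)).getD 0) dolz

-- ===== PRECONDITION & SPEC =====
-- Pre_ excludes inputs holding a negative mote when start ≥ 2 and some mote is ≥ start:
-- eating negative motes can drive summa to ≤ 1, where A's doubling step 2*summa-1 stops
-- growing and A loops forever, and B's ceiling/bit_length formula divides by summa-1
-- which is no longer positive.
def Pre_presmetaj (start : Int) (motes : List Int) (dolz : Int) : Prop :=
  start < 2 ∨ (∀ m ∈ motes, 0 ≤ m) ∨ (∀ m ∈ motes, m < start)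
instance (start : Int) (motes : List Int) (dolz : Int) : Decidable (Pre_presmetaj start motes dolz) := by unfold Pre_presmetaj; infer_instance

def pvWitness_presmetaj : Int × List Int × Int := (5, ([1, 2, 10], 3))

def Spec_presmetaj (start : Int) (motes : List Int) (dolz : Int) (out : Int) : Prop := out = presmetaj_alt start motes dolz
instance (start : Int) (motes : List Int) (dolz : Int) (out : Int) : Decidable (Spec_presmetaj start motes dolz out) := by unfold Spec_presmetaj; infer_instance

-- ===== CLAIM (what is proved, stated in full; the proofs are below) =====
def Claim_equal_presmetaj : Prop := ∀ (start : Int) (motes : List Int) (dolz : Int), Dom_presmetaj start motes dolz → Pre_presmetaj start motes dolz → Spec_presmetaj start motes dolz (presmetaj start motes dolz)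

-- ===== LEMMAS AND PROOFS =====

-- bit_length is the least k with n.natAbs < 2^k
lemma bitLength_le_iff (n : Int) (k : Nat) :
    PySem.Int.bitLength n ≤ k ↔ n.natAbs < 2 ^ k := by
  constructor
  · intro h
    exact lt_of_lt_of_le (PySem.Int.lt_two_pow_bitLength n) (Nat.pow_le_pow_right (by norm_num) h)
  · intro h
    by_contra hlt
    push_neg at hlt
    have hn : n ≠ 0 := by
      intro h0; subst h0; simp [PySem.Int.bitLength_zero] at hlt
    have h1 : 2 ^ (PySem.Int.bitLength n - 1) ≤ n.natAbs := PySem.Int.two_pow_bitLength_le n hn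
    have h2 : 2 ^ (PySem.Int.bitLength n - 1) < 2 ^ k := lt_of_le_of_lt h1 h
    have := (Nat.pow_lt_pow_iff_right (by norm_num : 1 < 2)).mp h2
    omega

-- ceiling division: q = ⌈m/g⌉ brackets m between g*(q-1) and g*q
lemma ceil_brackets {g m q : Int} (hg : 0 < g)
    (hq : PySem.Int.floordiv (m + g - 1) g = q) :
    g * (q - 1) < m ∧ m ≤ g * q := by
  have h := (PySem.Int.floordiv_eq_iff_of_pos hg).mp hq
  constructor <;> nlinarith [h.1, h.2]

-- m ≤ g*c  ↔  ⌈m/g⌉ ≤ c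
lemma ceil_le_iff {g m q : Int} (hg : 0 < g)
    (hb : g * (q - 1) < m ∧ m ≤ g * q) (c : Int) :
    m ≤ g * c ↔ q ≤ c := by
  constructor
  · intro h
    by_contra hc
    push_neg at hc
    have hcq : c ≤ q - 1 := by omega
    nlinarith [hb.1]
  · intro h
    nlinarith [hb.2]

-- A's doubling loop returns ((summa-1)*2^k + 1, k) for the minimal k with m ≤ (summa-1)*2^k
lemma grow_spec : ∀ (f : Nat) (s m : Int) (k : Nat), 2 ≤ s → (m - s).toNat < f →
    m ≤ (s - 1) * 2 ^ k → (∀ j : Nat, j < k → ¬ (m ≤ (s - 1) * 2 ^ j)) →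
    presmetajGrow f s m = ((s - 1) * 2 ^ k + 1, (k : Int)) := by
  intro f
  induction f with
  | zero => intro s m k _ hf _ _; omega
  | succ f ih =>
    intro s m k hs hf hP hmin
    by_cases hsm : s ≤ m
    · have hk : k ≠ 0 := by
        intro h0; subst h0; simp at hP; omega
      obtain ⟨k', rfl⟩ : ∃ k', k = k' + 1 := ⟨k - 1, by omega⟩
      by_cases hdm : s + s - 1 ≤ m
      · -- the doubled summa is still ≤ m: recurse
        have hfuel : (m - (s + s - 1)).toNat < f := by omega
        have hP' : m ≤ (s + s - 1 - 1) * 2 ^ k' := by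
          have he : (s + s - 1 - 1) * 2 ^ k' = (s - 1) * 2 ^ (k' + 1) := by ring
          omega
        have hmin' : ∀ j : Nat, j < k' → ¬ (m ≤ (s + s - 1 - 1) * 2 ^ j) := by
          intro j hj hPj
          refine hmin (j + 1) (by omega) ?_
          have he : (s - 1) * 2 ^ (j + 1) = (s + s - 1 - 1) * 2 ^ j := by ring
          omega
        have hrec := ih (s + s - 1) m k' (by omega) hfuel hP' hmin'
        simp only [presmetajGrow, if_pos hsm, hrec]
        have he : (s + s - 1 - 1) * 2 ^ k' = (s - 1) * 2 ^ (k' + 1) := by ring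
        rw [Prod.mk.injEq]
        constructor
        · omega
        · push_cast
          ring
      · -- one doubling already exceeds m
        have hk'0 : k' = 0 := by
          by_contra h0
          have h1 := hmin 1 (by omega)
          have he : (s - 1) * 2 ^ 1 = s + s - 2 := by ring
          omega
        subst hk'0
        have hr : presmetajGrow f (s + s - 1) m = (s + s - 1, 0) := by
          cases f with
          | zero => rfl
          | succ f2 => simp [presmetajGrow, hdm]
        simp only [presmetajGrow, if_pos hsm, hr]
        rw [Prod.mk.injEq]
        constructor
        · have he : (s - 1) * 2 ^ (0 + 1) = s + s - 2 := by ring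
          omega
        · simp
    · have hk : k = 0 := by
        by_contra h0
        refine hmin 0 (by omega) ?_
        simp
        omega
      subst hk
      simp only [presmetajGrow, if_neg hsm, pow_zero, mul_one]
      rw [Prod.mk.injEq]
      constructor
      · omega
      · simp

-- max of a nonempty sorted list is its last element
lemma foldl_max_sorted : ∀ (rs : List Int) (m : Int), (m :: rs).Pairwise (· ≤ ·) →
    rs.foldl max m = (m :: rs).getLast (List.cons_ne_nil m rs) := by
  intro rs
  induction rs with
  | nil => intro m _; simp
  | cons b t ih =>
    intro m hp
    have hmb : m ≤ b := (List.pairwise_cons.mp hp).1 b (by simp)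
    have ht := ih b (List.pairwise_cons.mp hp).2
    simp only [List.foldl_cons, max_eq_right hmb, ht]
    rw [List.getLast_cons (List.cons_ne_nil b t)]

lemma max_sorted_getD (rs : List Int) (m : Int) (hp : (m :: rs).Pairwise (· ≤ ·)) :
    (PySem.List.max? (m :: rs) (fun y => y)).getD 0 = (m :: rs).getLast (List.cons_ne_nil m rs) := by
  rw [PySem.List.max?_id_cons]
  simp [foldl_max_sorted rs m hp]

-- the two loops agree on a sorted suffix of nonnegative motes
lemma loop_eq (f : Nat) : ∀ (rest : List Int) (summa ops last dolz : Int),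
    rest.Pairwise (· ≤ ·) → (∀ x ∈ rest, 0 ≤ x) → 2 ≤ summa →
    2 * rest.length + 1 ≤ f →
    (∀ h : rest ≠ [], rest.getLast h = last) →
    presmetajLoop f summa ops rest dolz = presmetajAltLoop rest summa ops last dolz := by
  induction f using Nat.strong_induction_on with
  | _ f ih =>
    intro rest summa ops last dolz hsort hnn hs hf hlast
    obtain ⟨f', rfl⟩ : ∃ f', f = f' + 1 := ⟨f - 1, by omega⟩
    cases rest with
    | nil => simp [presmetajLoop, presmetajAltLoop]
    | cons m rs =>
      have hml : (PySem.List.max? (m :: rs) (fun y => y)).getD 0 = last := by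
        rw [max_sorted_getD rs m hsort, hlast (List.cons_ne_nil m rs)]
      have hm0 : 0 ≤ m := hnn m (by simp)
      have hlast' : ∀ h : rs ≠ [], rs.getLast h = last := by
        intro h
        rw [← hlast (List.cons_ne_nil m rs), List.getLast_cons h]
      simp only [presmetajLoop, presmetajAltLoop, hml]
      by_cases h1 : summa > last
      · simp [h1]
      · simp only [if_neg h1]
        by_cases h2 : summa > m
        · -- eat the mote
          rw [if_pos h2, if_neg (by omega : ¬ summa ≤ m)]
          refine ih f' (by omega) rs (summa + m) ops last dolz hsort.of_cons
            (fun x hx => hnn x (by simp [hx])) (by omega) ?_ hlast'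
          simp only [List.length_cons] at hf
          omega
        · -- grow, then A revisits the same index while B eats directly
          rw [if_neg h2, if_pos (by omega : summa ≤ m)]
          have hsm : summa ≤ m := by omega
          set g : Int := summa - 1 with hg
          have hgpos : 0 < g := by omega
          set q : Int := PySem.Int.floordiv (m + g - 1) g with hq
          have hbr := ceil_brackets hgpos hq.symm
          have hiff := ceil_le_iff hgpos hbr
          set K : Nat := PySem.Int.bitLength (q - 1) with hK
          have hq1 : 1 ≤ q := by nlinarith [hbr.2]
          have hPiff : ∀ c : Nat, (m ≤ g * 2 ^ c) ↔ K ≤ c := by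
            intro c
            rw [hiff ((2 : Int) ^ c), hK, bitLength_le_iff]
            have habs : ((q - 1).natAbs : Int) = q - 1 := Int.natAbs_of_nonneg (by omega)
            have hcast : (((2 : Nat) ^ c : Nat) : Int) = (2 : Int) ^ c := by push_cast; ring
            constructor
            · intro h
              have h' : ((q - 1).natAbs : Int) < (((2 : Nat) ^ c : Nat) : Int) := by
                rw [habs, hcast]; omega
              exact_mod_cast h'
            · intro h
              have h' : ((q - 1).natAbs : Int) < (((2 : Nat) ^ c : Nat) : Int) := by exact_mod_cast h
              rw [habs, hcast] at h'
              omega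
          have hPK : m ≤ g * 2 ^ K := (hPiff K).mpr le_rfl
          have hgrow : presmetajGrow ((m - summa).toNat + 1) summa m = (g * 2 ^ K + 1, (K : Int)) := by
            have hgs := grow_spec ((m - summa).toNat + 1) summa m K hs (by omega)
              (by rw [← hg]; exact hPK)
              (fun j hj hPj => absurd ((hPiff j).mp (by rw [← hg] at hPj; exact hPj)) (by omega))
            rw [hgs, ← hg]
          rw [hgrow]
          have hlen : ((m :: rs).length : Int) = (rs.length : Int) + 1 := by
            simp [List.length_cons]
          simp only [hlen]
          have hpow1 : (1 : Int) ≤ 2 ^ K := one_le_pow₀ (by norm_num)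
          have hs2 : 2 ≤ g * 2 ^ K + 1 := by nlinarith
          by_cases h3 : ((K : Int) ≥ (rs.length : Int) + 1)
          · rw [if_pos h3, if_pos h3]
          · rw [if_neg h3, if_neg h3]
            -- A revisits the same element with the grown summa
            obtain ⟨f2, rfl⟩ : ∃ f2, f' = f2 + 1 := by
              refine ⟨f' - 1, ?_⟩
              simp only [List.length_cons] at hf
              omega
            simp only [presmetajLoop, hml]
            by_cases h4 : g * 2 ^ K + 1 > last
            · rw [if_pos h4]
              cases rs with
              | nil => simp [presmetajAltLoop]
              | cons b t =>
                have : g * 2 ^ K + 1 + m > last := by omega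
                simp only [presmetajAltLoop]
                rw [if_pos this]
            · rw [if_neg h4, if_pos (by omega : g * 2 ^ K + 1 > m)]
              refine ih f2 (by omega) rs (g * 2 ^ K + 1 + m) (ops + (K : Int)) last dolz
                hsort.of_cons (fun x hx => hnn x (by simp [hx])) (by omega) ?_ hlast'
              simp only [List.length_cons] at hf
              omega

-- ===== VERDICT (by name: the statement is the Claim_ definition above) =====
theorem presmetaj_spec : Claim_equal_presmetaj := by
  intro start motes dolz hdom hpre
  unfold Spec_presmetaj presmetaj presmetaj_alt
  by_cases hst : start < 2
  · simp [hst]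
  · simp only [if_neg hst]
    have hsort : (PySem.List.sorted motes (fun y => y) false).Pairwise (· ≤ ·) :=
      PySem.List.sorted_pairwise motes (fun y => y)
    have hpre' : (∀ m ∈ motes, 0 ≤ m) ∨ (∀ m ∈ motes, m < start) := by
      rcases hpre with h | h | h
      · omega
      · exact Or.inl h
      · exact Or.inr h
    cases hms : PySem.List.sorted motes (fun y => y) false with
    | nil => simp [presmetajLoop]
    | cons m rs =>
      rw [hms] at hsort
      have hget : (PySem.List.pyGet? (m :: rs) (-1)).getD 0
          = (m :: rs).getLast (List.cons_ne_nil m rs) := by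
        rw [PySem.List.pyGet?_neg_one]
        simp [List.getLast?_eq_some_getLast]
      simp only []
      rw [hget]
      rcases hpre' with h | h
      · have hnn : ∀ x ∈ m :: rs, 0 ≤ x := by
          intro x hx
          exact h x ((PySem.List.mem_sorted motes (fun y => y) false x).mp (hms ▸ hx))
        exact loop_eq (2 * (m :: rs).length + 1) (m :: rs) start 0 _ dolz hsort hnn
          (by omega) (by omega) (fun h => rfl)
      · -- start already exceeds every mote: both sides return min dolz 0 at once
        have hlt : ∀ x ∈ m :: rs, x < start := by
          intro x hx
          exact h x ((PySem.List.mem_sorted motes (fun y => y) false x).mp (hms ▸ hx))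
        have hmax : start > (PySem.List.max? (m :: rs) (fun y => y)).getD 0 := by
          rw [PySem.List.max?_id_cons]
          simp only [Option.getD_some]
          rcases PySem.List.foldl_max_mem rs m with hm | hm
          · rw [hm]; exact hlt m (by simp)
          · exact hlt _ (by simp [hm])
        have hlst : start > (m :: rs).getLast (List.cons_ne_nil m rs) :=
          hlt _ (List.getLast_mem (List.cons_ne_nil m rs))
        simp only [presmetajLoop, presmetajAltLoop]
        rw [if_pos hmax, if_pos hlst]
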